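-- pv_equiv track=rewrite | github.com/ValentinVignal/midiGenerator | src/midi.py | return_correct_name
-- ===== SOURCE A (Python) =====
-- all_instruments = {
--     'Piano': ['Acoustic Grand Piano', 'Bright Acoustic Piano', 'Electric Grand Piano', 'Honky-tonk Piano',
--               'Electric Piano 1', 'Electric Piano 2', 'Harpsichord', 'Clavinet'],
--     'Chromatic Percussion': ['Celesta', 'Glockenspiel', 'Music Box', 'Vibraphone', 'Miramba', 'Xylophone',
--                              'Tubular Bells', 'Dulcimer'],
--     'Organ': ['Drawbar Organ', 'Percussive Organ', 'Rock Organ', 'Church Organ', 'Reed Organ', 'Accordion', 'Harmonica',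
--               'Tango Accordion'],
--     'Guitar': ['Acoustic Guitar (nylon)', 'Acoustic Guitar (steel)', 'Electric Guitar (jazz)',
--                'Electric Guitar (clean)', 'Electric Guitar (muted)', 'Overdriven Guitar', 'Distortion Guitar',
--                'Guitar Harmonics'],
--     'Bass': ['Acoustic Bass', 'Electric Bass (finger)', 'Electric Bass (pick)', 'Fretless Bass', 'Slap Bass 1',
--              'Slap Bass 2', 'Synth Bass 1', 'Synth Bass 2'],
--     'Strings': ['Violin', 'Viola', 'Cello', 'Contrabass', 'Tremolo Strings', 'Pizzicato Strings', 'Orchestral Harp',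
--                 'Timpani'],
--     'Ensemble': ['String Ensemble 1', 'String Ensemble 2', 'Synth Strings 1', 'Synth Strings 2', 'Choir Aahs',
--                  'Voice Oohs', 'Synth Choir', 'Orchestra Hit'],
--     'Brass': ['Trumpet', 'Trombone', 'Tuba', 'Muted Trumpet', 'French Horn', 'Brass Section', 'Synth Brass 1',
--               'Synth Brass 2'],
--     'Reed': ['Soprano Sax', 'Alto Sax', 'Tenor Sax', 'Baritone Sax', 'Oboe', 'English Horn', 'Bassoon', 'Clarinet'],
--     'Pipe': ['Piccolo', 'Flute', 'Recorder', 'Pan Flute', 'Blown bottle', 'Shakuhachi', 'Whistle', 'Ocarina'],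
--     'Synth Lead': ['Lead 1 (square)', 'Lead 2 (sawtooth)', 'Lead 3 (calliope)', 'Lead 4 (chiff)', 'Lead 5 (charang)',
--                    'Lead 6 (voice)', 'Lead 7 (fifths)', 'Lead 8 (bass + lead)'],
--     'Pad': ['Pad 1 (new age)', 'Pad 2 (warm)', 'Pad 3 (polysynth)', 'Pad 4 (choir)', 'Pad 5 (bowed)',
--             'Pad 6 (metallic)', 'Pad 7 (halo)', 'Pad 8 (sweep)'],
--     'Synth Effects': ['FX 1 (rain)', 'FX 2 (soundtrack)', 'FX 3 (crystal)', 'FX 4 (atmosphere)', 'FX 5 (brightness)',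
--                       'FX 6 (goblins)', 'FX 7 (echoes)', 'FX 8 (sci-fi)'],
--     'Ethnic': ['Sitar', 'Banjo', 'Shamisen', 'Koto', 'Kalimba', 'Bagpipe', 'Fiddle', 'Shanai'],
--     'Percussive': ['Tinkle Bell', 'Agogo', 'Steel Drums', 'Woodblock', 'Taiko Drum', 'Melodic Tom', 'Synth Drum',
--                    'Reverse Cymbal'],
--     'Sound Effects': ['Guitar Fret Noise', 'Breath Noise', 'Seashore', 'Bird Tweet', 'Telephone Ring', 'Helicopter',
--                       'Applause', 'Gunshot']
-- }
--
-- all_instruments_perso = {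
--     'Piano': ['Electric Piano', 'Piano'],
--     'Chromatic Percussion': ['Chromatic Percussion'],
--     'Organ': ['Organ'],
--     'Guitar': ['Guitar', 'Acoustic Guitar', 'Electric Guitar'],
--     'Bass': ['Electric Bass', 'Bass'],
--     'Strings': ['Strings'],
--     'Ensemble': ['Ensemble', 'String Ensemble', 'Synth String', 'Choir'],
--     'Brass': ['Brass', 'Synth Brass'],
--     'Reed': ['Sax', 'Horn', 'Reed'],
--     'Pipe': ['Pipe'],
--     'Synth Lead': ['Synth Lead', 'Lead', 'Lead 1', 'Lead 2', 'Lead 3', 'Lead 4', 'Lead 5', 'Lead 6', 'Lead 7',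
--                    'Lead 8'],
--     'Pad': ['Pad', 'Pad 1', 'Pad 2', 'Pad 3', 'Pad 4', 'Pad 5', 'Pad 6', 'Pad 7', 'Pad 8'],
--     'Synth Effects': ['Synth Effects', 'FX', 'FX 1', 'FX 2', 'FX 3', 'FX 4', 'FX 5', 'FX 6', 'FX 7', 'FX 8'],
--     'Ethnic': ['Ethnic'],
--     'Percussive': ['Percussive'],
--     'Sound Effects': ['Sound Effects']
--
-- }
--
-- def return_correct_name(name):
--     """
--
--     :param name: name of the instrument
--     :return: A name of correct instrument (exists in midi format)
--     """
--     correct_name = 'Accoustic Grand Piano'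
--
--     for k in all_instruments:
--         if name in all_instruments[k]:
--             correct_name = name
--     for k in all_instruments_perso:
--         if name in all_instruments_perso[k]:
--             correct_name = all_instruments[k][0]
--
--     return correct_name
-- ===== SOURCE B (Python) =====
-- # Flat precomputed lookup table: every recognised name (canonical names map to
-- # themselves, aliases map to their category's first canonical entry) written out
-- # once, so the function is a single dict lookup with the misspelled default A uses.
-- _CANONICAL = {
--     'Acoustic Grand Piano': 'Acoustic Grand Piano',
--     'Bright Acoustic Piano': 'Bright Acoustic Piano',
--     'Electric Grand Piano': 'Electric Grand Piano',
--     'Honky-tonk Piano': 'Honky-tonk Piano',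
--     'Electric Piano 1': 'Electric Piano 1',
--     'Electric Piano 2': 'Electric Piano 2',
--     'Harpsichord': 'Harpsichord',
--     'Clavinet': 'Clavinet',
--     'Celesta': 'Celesta',
--     'Glockenspiel': 'Glockenspiel',
--     'Music Box': 'Music Box',
--     'Vibraphone': 'Vibraphone',
--     'Miramba': 'Miramba',
--     'Xylophone': 'Xylophone',
--     'Tubular Bells': 'Tubular Bells',
--     'Dulcimer': 'Dulcimer',
--     'Drawbar Organ': 'Drawbar Organ',
--     'Percussive Organ': 'Percussive Organ',
--     'Rock Organ': 'Rock Organ',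
--     'Church Organ': 'Church Organ',
--     'Reed Organ': 'Reed Organ',
--     'Accordion': 'Accordion',
--     'Harmonica': 'Harmonica',
--     'Tango Accordion': 'Tango Accordion',
--     'Acoustic Guitar (nylon)': 'Acoustic Guitar (nylon)',
--     'Acoustic Guitar (steel)': 'Acoustic Guitar (steel)',
--     'Electric Guitar (jazz)': 'Electric Guitar (jazz)',
--     'Electric Guitar (clean)': 'Electric Guitar (clean)',
--     'Electric Guitar (muted)': 'Electric Guitar (muted)',
--     'Overdriven Guitar': 'Overdriven Guitar',
--     'Distortion Guitar': 'Distortion Guitar',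
--     'Guitar Harmonics': 'Guitar Harmonics',
--     'Acoustic Bass': 'Acoustic Bass',
--     'Electric Bass (finger)': 'Electric Bass (finger)',
--     'Electric Bass (pick)': 'Electric Bass (pick)',
--     'Fretless Bass': 'Fretless Bass',
--     'Slap Bass 1': 'Slap Bass 1',
--     'Slap Bass 2': 'Slap Bass 2',
--     'Synth Bass 1': 'Synth Bass 1',
--     'Synth Bass 2': 'Synth Bass 2',
--     'Violin': 'Violin',
--     'Viola': 'Viola',
--     'Cello': 'Cello',
--     'Contrabass': 'Contrabass',
--     'Tremolo Strings': 'Tremolo Strings',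
--     'Pizzicato Strings': 'Pizzicato Strings',
--     'Orchestral Harp': 'Orchestral Harp',
--     'Timpani': 'Timpani',
--     'String Ensemble 1': 'String Ensemble 1',
--     'String Ensemble 2': 'String Ensemble 2',
--     'Synth Strings 1': 'Synth Strings 1',
--     'Synth Strings 2': 'Synth Strings 2',
--     'Choir Aahs': 'Choir Aahs',
--     'Voice Oohs': 'Voice Oohs',
--     'Synth Choir': 'Synth Choir',
--     'Orchestra Hit': 'Orchestra Hit',
--     'Trumpet': 'Trumpet',
--     'Trombone': 'Trombone',
--     'Tuba': 'Tuba',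
--     'Muted Trumpet': 'Muted Trumpet',
--     'French Horn': 'French Horn',
--     'Brass Section': 'Brass Section',
--     'Synth Brass 1': 'Synth Brass 1',
--     'Synth Brass 2': 'Synth Brass 2',
--     'Soprano Sax': 'Soprano Sax',
--     'Alto Sax': 'Alto Sax',
--     'Tenor Sax': 'Tenor Sax',
--     'Baritone Sax': 'Baritone Sax',
--     'Oboe': 'Oboe',
--     'English Horn': 'English Horn',
--     'Bassoon': 'Bassoon',
--     'Clarinet': 'Clarinet',
--     'Piccolo': 'Piccolo',
--     'Flute': 'Flute',
--     'Recorder': 'Recorder',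
--     'Pan Flute': 'Pan Flute',
--     'Blown bottle': 'Blown bottle',
--     'Shakuhachi': 'Shakuhachi',
--     'Whistle': 'Whistle',
--     'Ocarina': 'Ocarina',
--     'Lead 1 (square)': 'Lead 1 (square)',
--     'Lead 2 (sawtooth)': 'Lead 2 (sawtooth)',
--     'Lead 3 (calliope)': 'Lead 3 (calliope)',
--     'Lead 4 (chiff)': 'Lead 4 (chiff)',
--     'Lead 5 (charang)': 'Lead 5 (charang)',
--     'Lead 6 (voice)': 'Lead 6 (voice)',
--     'Lead 7 (fifths)': 'Lead 7 (fifths)',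
--     'Lead 8 (bass + lead)': 'Lead 8 (bass + lead)',
--     'Pad 1 (new age)': 'Pad 1 (new age)',
--     'Pad 2 (warm)': 'Pad 2 (warm)',
--     'Pad 3 (polysynth)': 'Pad 3 (polysynth)',
--     'Pad 4 (choir)': 'Pad 4 (choir)',
--     'Pad 5 (bowed)': 'Pad 5 (bowed)',
--     'Pad 6 (metallic)': 'Pad 6 (metallic)',
--     'Pad 7 (halo)': 'Pad 7 (halo)',
--     'Pad 8 (sweep)': 'Pad 8 (sweep)',
--     'FX 1 (rain)': 'FX 1 (rain)',
--     'FX 2 (soundtrack)': 'FX 2 (soundtrack)',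
--     'FX 3 (crystal)': 'FX 3 (crystal)',
--     'FX 4 (atmosphere)': 'FX 4 (atmosphere)',
--     'FX 5 (brightness)': 'FX 5 (brightness)',
--     'FX 6 (goblins)': 'FX 6 (goblins)',
--     'FX 7 (echoes)': 'FX 7 (echoes)',
--     'FX 8 (sci-fi)': 'FX 8 (sci-fi)',
--     'Sitar': 'Sitar',
--     'Banjo': 'Banjo',
--     'Shamisen': 'Shamisen',
--     'Koto': 'Koto',
--     'Kalimba': 'Kalimba',
--     'Bagpipe': 'Bagpipe',
--     'Fiddle': 'Fiddle',
--     'Shanai': 'Shanai',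
--     'Tinkle Bell': 'Tinkle Bell',
--     'Agogo': 'Agogo',
--     'Steel Drums': 'Steel Drums',
--     'Woodblock': 'Woodblock',
--     'Taiko Drum': 'Taiko Drum',
--     'Melodic Tom': 'Melodic Tom',
--     'Synth Drum': 'Synth Drum',
--     'Reverse Cymbal': 'Reverse Cymbal',
--     'Guitar Fret Noise': 'Guitar Fret Noise',
--     'Breath Noise': 'Breath Noise',
--     'Seashore': 'Seashore',
--     'Bird Tweet': 'Bird Tweet',
--     'Telephone Ring': 'Telephone Ring',
--     'Helicopter': 'Helicopter',
--     'Applause': 'Applause',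
--     'Gunshot': 'Gunshot',
--     'Electric Piano': 'Acoustic Grand Piano',
--     'Piano': 'Acoustic Grand Piano',
--     'Chromatic Percussion': 'Celesta',
--     'Organ': 'Drawbar Organ',
--     'Guitar': 'Acoustic Guitar (nylon)',
--     'Acoustic Guitar': 'Acoustic Guitar (nylon)',
--     'Electric Guitar': 'Acoustic Guitar (nylon)',
--     'Electric Bass': 'Acoustic Bass',
--     'Bass': 'Acoustic Bass',
--     'Strings': 'Violin',
--     'Ensemble': 'String Ensemble 1',
--     'String Ensemble': 'String Ensemble 1',
--     'Synth String': 'String Ensemble 1',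
--     'Choir': 'String Ensemble 1',
--     'Brass': 'Trumpet',
--     'Synth Brass': 'Trumpet',
--     'Sax': 'Soprano Sax',
--     'Horn': 'Soprano Sax',
--     'Reed': 'Soprano Sax',
--     'Pipe': 'Piccolo',
--     'Synth Lead': 'Lead 1 (square)',
--     'Lead': 'Lead 1 (square)',
--     'Lead 1': 'Lead 1 (square)',
--     'Lead 2': 'Lead 1 (square)',
--     'Lead 3': 'Lead 1 (square)',
--     'Lead 4': 'Lead 1 (square)',
--     'Lead 5': 'Lead 1 (square)',
--     'Lead 6': 'Lead 1 (square)',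
--     'Lead 7': 'Lead 1 (square)',
--     'Lead 8': 'Lead 1 (square)',
--     'Pad': 'Pad 1 (new age)',
--     'Pad 1': 'Pad 1 (new age)',
--     'Pad 2': 'Pad 1 (new age)',
--     'Pad 3': 'Pad 1 (new age)',
--     'Pad 4': 'Pad 1 (new age)',
--     'Pad 5': 'Pad 1 (new age)',
--     'Pad 6': 'Pad 1 (new age)',
--     'Pad 7': 'Pad 1 (new age)',
--     'Pad 8': 'Pad 1 (new age)',
--     'Synth Effects': 'FX 1 (rain)',
--     'FX': 'FX 1 (rain)',
--     'FX 1': 'FX 1 (rain)',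
--     'FX 2': 'FX 1 (rain)',
--     'FX 3': 'FX 1 (rain)',
--     'FX 4': 'FX 1 (rain)',
--     'FX 5': 'FX 1 (rain)',
--     'FX 6': 'FX 1 (rain)',
--     'FX 7': 'FX 1 (rain)',
--     'FX 8': 'FX 1 (rain)',
--     'Ethnic': 'Sitar',
--     'Percussive': 'Tinkle Bell',
--     'Sound Effects': 'Guitar Fret Noise',
-- }
--
--
-- def return_correct_name(name):
--     """
--
--     :param name: name of the instrument
--     :return: A name of correct instrument (exists in midi format)
--     """
--     return _CANONICAL.get(name, 'Accoustic Grand Piano')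
-- ===== Notes on version B (the rewrite author's own statement) =====
-- stated objective: simpler
-- what changed: Replaces A's two per-call scans over the nested category tables with one flat precomputed literal lookup table (each canonical name mapped to itself, each perso alias to its category's first entry, computed once by hand with aliases written after the names they override), so the function body is a single dict .get with the same default.
import Mathlib
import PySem

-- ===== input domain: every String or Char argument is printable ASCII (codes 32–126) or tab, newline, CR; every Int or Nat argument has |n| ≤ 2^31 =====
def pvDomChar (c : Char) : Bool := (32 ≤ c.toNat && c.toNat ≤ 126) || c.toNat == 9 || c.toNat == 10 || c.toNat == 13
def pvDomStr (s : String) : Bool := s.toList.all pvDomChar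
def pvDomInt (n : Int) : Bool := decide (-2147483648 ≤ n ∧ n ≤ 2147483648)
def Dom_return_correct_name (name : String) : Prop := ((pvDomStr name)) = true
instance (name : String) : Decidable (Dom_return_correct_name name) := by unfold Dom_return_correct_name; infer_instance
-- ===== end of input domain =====

-- B replaces A's two per-call scans over the nested instrument tables with one flat
-- precomputed literal lookup table (alias/name -> canonical name) and a single get (simpler).

-- ===== PORT A =====
def allInstruments : PySem.Dict String (List String) := PySem.Dict.mk [
  ("Piano", ["Acoustic Grand Piano", "Bright Acoustic Piano", "Electric Grand Piano", "Honky-tonk Piano", "Electric Piano 1", "Electric Piano 2", "Harpsichord", "Clavinet"]),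
  ("Chromatic Percussion", ["Celesta", "Glockenspiel", "Music Box", "Vibraphone", "Miramba", "Xylophone", "Tubular Bells", "Dulcimer"]),
  ("Organ", ["Drawbar Organ", "Percussive Organ", "Rock Organ", "Church Organ", "Reed Organ", "Accordion", "Harmonica", "Tango Accordion"]),
  ("Guitar", ["Acoustic Guitar (nylon)", "Acoustic Guitar (steel)", "Electric Guitar (jazz)", "Electric Guitar (clean)", "Electric Guitar (muted)", "Overdriven Guitar", "Distortion Guitar", "Guitar Harmonics"]),
  ("Bass", ["Acoustic Bass", "Electric Bass (finger)", "Electric Bass (pick)", "Fretless Bass", "Slap Bass 1", "Slap Bass 2", "Synth Bass 1", "Synth Bass 2"]),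
  ("Strings", ["Violin", "Viola", "Cello", "Contrabass", "Tremolo Strings", "Pizzicato Strings", "Orchestral Harp", "Timpani"]),
  ("Ensemble", ["String Ensemble 1", "String Ensemble 2", "Synth Strings 1", "Synth Strings 2", "Choir Aahs", "Voice Oohs", "Synth Choir", "Orchestra Hit"]),
  ("Brass", ["Trumpet", "Trombone", "Tuba", "Muted Trumpet", "French Horn", "Brass Section", "Synth Brass 1", "Synth Brass 2"]),
  ("Reed", ["Soprano Sax", "Alto Sax", "Tenor Sax", "Baritone Sax", "Oboe", "English Horn", "Bassoon", "Clarinet"]),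
  ("Pipe", ["Piccolo", "Flute", "Recorder", "Pan Flute", "Blown bottle", "Shakuhachi", "Whistle", "Ocarina"]),
  ("Synth Lead", ["Lead 1 (square)", "Lead 2 (sawtooth)", "Lead 3 (calliope)", "Lead 4 (chiff)", "Lead 5 (charang)", "Lead 6 (voice)", "Lead 7 (fifths)", "Lead 8 (bass + lead)"]),
  ("Pad", ["Pad 1 (new age)", "Pad 2 (warm)", "Pad 3 (polysynth)", "Pad 4 (choir)", "Pad 5 (bowed)", "Pad 6 (metallic)", "Pad 7 (halo)", "Pad 8 (sweep)"]),
  ("Synth Effects", ["FX 1 (rain)", "FX 2 (soundtrack)", "FX 3 (crystal)", "FX 4 (atmosphere)", "FX 5 (brightness)", "FX 6 (goblins)", "FX 7 (echoes)", "FX 8 (sci-fi)"]),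
  ("Ethnic", ["Sitar", "Banjo", "Shamisen", "Koto", "Kalimba", "Bagpipe", "Fiddle", "Shanai"]),
  ("Percussive", ["Tinkle Bell", "Agogo", "Steel Drums", "Woodblock", "Taiko Drum", "Melodic Tom", "Synth Drum", "Reverse Cymbal"]),
  ("Sound Effects", ["Guitar Fret Noise", "Breath Noise", "Seashore", "Bird Tweet", "Telephone Ring", "Helicopter", "Applause", "Gunshot"])
]

def allInstrumentsPerso : PySem.Dict String (List String) := PySem.Dict.mk [
  ("Piano", ["Electric Piano", "Piano"]),
  ("Chromatic Percussion", ["Chromatic Percussion"]),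
  ("Organ", ["Organ"]),
  ("Guitar", ["Guitar", "Acoustic Guitar", "Electric Guitar"]),
  ("Bass", ["Electric Bass", "Bass"]),
  ("Strings", ["Strings"]),
  ("Ensemble", ["Ensemble", "String Ensemble", "Synth String", "Choir"]),
  ("Brass", ["Brass", "Synth Brass"]),
  ("Reed", ["Sax", "Horn", "Reed"]),
  ("Pipe", ["Pipe"]),
  ("Synth Lead", ["Synth Lead", "Lead", "Lead 1", "Lead 2", "Lead 3", "Lead 4", "Lead 5", "Lead 6", "Lead 7", "Lead 8"]),
  ("Pad", ["Pad", "Pad 1", "Pad 2", "Pad 3", "Pad 4", "Pad 5", "Pad 6", "Pad 7", "Pad 8"]),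
  ("Synth Effects", ["Synth Effects", "FX", "FX 1", "FX 2", "FX 3", "FX 4", "FX 5", "FX 6", "FX 7", "FX 8"]),
  ("Ethnic", ["Ethnic"]),
  ("Percussive", ["Percussive"]),
  ("Sound Effects", ["Sound Effects"])
]

-- all_instruments[k][0]: both the dict lookup and the [0] always succeed (every k used
-- is a key of allInstruments and every category list is nonempty), so the defaults are unreachable.
def firstInstrument (k : String) : String :=
  (PySem.List.pyGet? (PySem.Dict.getD allInstruments k []) 0).getD ""

def return_correct_name (name : String) : String :=
  let c1 := (allInstruments.items).foldl
    (fun acc kv => if name ∈ kv.2 then name else acc) "Accoustic Grand Piano"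
  (allInstrumentsPerso.items).foldl
    (fun acc kv => if name ∈ kv.2 then firstInstrument kv.1 else acc) c1

-- ===== PORT B =====
-- the flat precomputed table from Source B, written out literally
def canonicalTable : PySem.Dict String String := PySem.Dict.mk [
  ("Acoustic Grand Piano", "Acoustic Grand Piano"),
  ("Bright Acoustic Piano", "Bright Acoustic Piano"),
  ("Electric Grand Piano", "Electric Grand Piano"),
  ("Honky-tonk Piano", "Honky-tonk Piano"),
  ("Electric Piano 1", "Electric Piano 1"),
  ("Electric Piano 2", "Electric Piano 2"),
  ("Harpsichord", "Harpsichord"),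
  ("Clavinet", "Clavinet"),
  ("Celesta", "Celesta"),
  ("Glockenspiel", "Glockenspiel"),
  ("Music Box", "Music Box"),
  ("Vibraphone", "Vibraphone"),
  ("Miramba", "Miramba"),
  ("Xylophone", "Xylophone"),
  ("Tubular Bells", "Tubular Bells"),
  ("Dulcimer", "Dulcimer"),
  ("Drawbar Organ", "Drawbar Organ"),
  ("Percussive Organ", "Percussive Organ"),
  ("Rock Organ", "Rock Organ"),
  ("Church Organ", "Church Organ"),
  ("Reed Organ", "Reed Organ"),
  ("Accordion", "Accordion"),
  ("Harmonica", "Harmonica"),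
  ("Tango Accordion", "Tango Accordion"),
  ("Acoustic Guitar (nylon)", "Acoustic Guitar (nylon)"),
  ("Acoustic Guitar (steel)", "Acoustic Guitar (steel)"),
  ("Electric Guitar (jazz)", "Electric Guitar (jazz)"),
  ("Electric Guitar (clean)", "Electric Guitar (clean)"),
  ("Electric Guitar (muted)", "Electric Guitar (muted)"),
  ("Overdriven Guitar", "Overdriven Guitar"),
  ("Distortion Guitar", "Distortion Guitar"),
  ("Guitar Harmonics", "Guitar Harmonics"),
  ("Acoustic Bass", "Acoustic Bass"),
  ("Electric Bass (finger)", "Electric Bass (finger)"),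
  ("Electric Bass (pick)", "Electric Bass (pick)"),
  ("Fretless Bass", "Fretless Bass"),
  ("Slap Bass 1", "Slap Bass 1"),
  ("Slap Bass 2", "Slap Bass 2"),
  ("Synth Bass 1", "Synth Bass 1"),
  ("Synth Bass 2", "Synth Bass 2"),
  ("Violin", "Violin"),
  ("Viola", "Viola"),
  ("Cello", "Cello"),
  ("Contrabass", "Contrabass"),
  ("Tremolo Strings", "Tremolo Strings"),
  ("Pizzicato Strings", "Pizzicato Strings"),
  ("Orchestral Harp", "Orchestral Harp"),
  ("Timpani", "Timpani"),
  ("String Ensemble 1", "String Ensemble 1"),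
  ("String Ensemble 2", "String Ensemble 2"),
  ("Synth Strings 1", "Synth Strings 1"),
  ("Synth Strings 2", "Synth Strings 2"),
  ("Choir Aahs", "Choir Aahs"),
  ("Voice Oohs", "Voice Oohs"),
  ("Synth Choir", "Synth Choir"),
  ("Orchestra Hit", "Orchestra Hit"),
  ("Trumpet", "Trumpet"),
  ("Trombone", "Trombone"),
  ("Tuba", "Tuba"),
  ("Muted Trumpet", "Muted Trumpet"),
  ("French Horn", "French Horn"),
  ("Brass Section", "Brass Section"),
  ("Synth Brass 1", "Synth Brass 1"),
  ("Synth Brass 2", "Synth Brass 2"),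
  ("Soprano Sax", "Soprano Sax"),
  ("Alto Sax", "Alto Sax"),
  ("Tenor Sax", "Tenor Sax"),
  ("Baritone Sax", "Baritone Sax"),
  ("Oboe", "Oboe"),
  ("English Horn", "English Horn"),
  ("Bassoon", "Bassoon"),
  ("Clarinet", "Clarinet"),
  ("Piccolo", "Piccolo"),
  ("Flute", "Flute"),
  ("Recorder", "Recorder"),
  ("Pan Flute", "Pan Flute"),
  ("Blown bottle", "Blown bottle"),
  ("Shakuhachi", "Shakuhachi"),
  ("Whistle", "Whistle"),
  ("Ocarina", "Ocarina"),
  ("Lead 1 (square)", "Lead 1 (square)"),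
  ("Lead 2 (sawtooth)", "Lead 2 (sawtooth)"),
  ("Lead 3 (calliope)", "Lead 3 (calliope)"),
  ("Lead 4 (chiff)", "Lead 4 (chiff)"),
  ("Lead 5 (charang)", "Lead 5 (charang)"),
  ("Lead 6 (voice)", "Lead 6 (voice)"),
  ("Lead 7 (fifths)", "Lead 7 (fifths)"),
  ("Lead 8 (bass + lead)", "Lead 8 (bass + lead)"),
  ("Pad 1 (new age)", "Pad 1 (new age)"),
  ("Pad 2 (warm)", "Pad 2 (warm)"),
  ("Pad 3 (polysynth)", "Pad 3 (polysynth)"),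
  ("Pad 4 (choir)", "Pad 4 (choir)"),
  ("Pad 5 (bowed)", "Pad 5 (bowed)"),
  ("Pad 6 (metallic)", "Pad 6 (metallic)"),
  ("Pad 7 (halo)", "Pad 7 (halo)"),
  ("Pad 8 (sweep)", "Pad 8 (sweep)"),
  ("FX 1 (rain)", "FX 1 (rain)"),
  ("FX 2 (soundtrack)", "FX 2 (soundtrack)"),
  ("FX 3 (crystal)", "FX 3 (crystal)"),
  ("FX 4 (atmosphere)", "FX 4 (atmosphere)"),
  ("FX 5 (brightness)", "FX 5 (brightness)"),
  ("FX 6 (goblins)", "FX 6 (goblins)"),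
  ("FX 7 (echoes)", "FX 7 (echoes)"),
  ("FX 8 (sci-fi)", "FX 8 (sci-fi)"),
  ("Sitar", "Sitar"),
  ("Banjo", "Banjo"),
  ("Shamisen", "Shamisen"),
  ("Koto", "Koto"),
  ("Kalimba", "Kalimba"),
  ("Bagpipe", "Bagpipe"),
  ("Fiddle", "Fiddle"),
  ("Shanai", "Shanai"),
  ("Tinkle Bell", "Tinkle Bell"),
  ("Agogo", "Agogo"),
  ("Steel Drums", "Steel Drums"),
  ("Woodblock", "Woodblock"),
  ("Taiko Drum", "Taiko Drum"),
  ("Melodic Tom", "Melodic Tom"),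
  ("Synth Drum", "Synth Drum"),
  ("Reverse Cymbal", "Reverse Cymbal"),
  ("Guitar Fret Noise", "Guitar Fret Noise"),
  ("Breath Noise", "Breath Noise"),
  ("Seashore", "Seashore"),
  ("Bird Tweet", "Bird Tweet"),
  ("Telephone Ring", "Telephone Ring"),
  ("Helicopter", "Helicopter"),
  ("Applause", "Applause"),
  ("Gunshot", "Gunshot"),
  ("Electric Piano", "Acoustic Grand Piano"),
  ("Piano", "Acoustic Grand Piano"),
  ("Chromatic Percussion", "Celesta"),
  ("Organ", "Drawbar Organ"),
  ("Guitar", "Acoustic Guitar (nylon)"),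
  ("Acoustic Guitar", "Acoustic Guitar (nylon)"),
  ("Electric Guitar", "Acoustic Guitar (nylon)"),
  ("Electric Bass", "Acoustic Bass"),
  ("Bass", "Acoustic Bass"),
  ("Strings", "Violin"),
  ("Ensemble", "String Ensemble 1"),
  ("String Ensemble", "String Ensemble 1"),
  ("Synth String", "String Ensemble 1"),
  ("Choir", "String Ensemble 1"),
  ("Brass", "Trumpet"),
  ("Synth Brass", "Trumpet"),
  ("Sax", "Soprano Sax"),
  ("Horn", "Soprano Sax"),
  ("Reed", "Soprano Sax"),
  ("Pipe", "Piccolo"),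
  ("Synth Lead", "Lead 1 (square)"),
  ("Lead", "Lead 1 (square)"),
  ("Lead 1", "Lead 1 (square)"),
  ("Lead 2", "Lead 1 (square)"),
  ("Lead 3", "Lead 1 (square)"),
  ("Lead 4", "Lead 1 (square)"),
  ("Lead 5", "Lead 1 (square)"),
  ("Lead 6", "Lead 1 (square)"),
  ("Lead 7", "Lead 1 (square)"),
  ("Lead 8", "Lead 1 (square)"),
  ("Pad", "Pad 1 (new age)"),
  ("Pad 1", "Pad 1 (new age)"),
  ("Pad 2", "Pad 1 (new age)"),
  ("Pad 3", "Pad 1 (new age)"),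
  ("Pad 4", "Pad 1 (new age)"),
  ("Pad 5", "Pad 1 (new age)"),
  ("Pad 6", "Pad 1 (new age)"),
  ("Pad 7", "Pad 1 (new age)"),
  ("Pad 8", "Pad 1 (new age)"),
  ("Synth Effects", "FX 1 (rain)"),
  ("FX", "FX 1 (rain)"),
  ("FX 1", "FX 1 (rain)"),
  ("FX 2", "FX 1 (rain)"),
  ("FX 3", "FX 1 (rain)"),
  ("FX 4", "FX 1 (rain)"),
  ("FX 5", "FX 1 (rain)"),
  ("FX 6", "FX 1 (rain)"),
  ("FX 7", "FX 1 (rain)"),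
  ("FX 8", "FX 1 (rain)"),
  ("Ethnic", "Sitar"),
  ("Percussive", "Tinkle Bell"),
  ("Sound Effects", "Guitar Fret Noise")
]

def return_correct_name_alt (name : String) : String :=
  PySem.Dict.getD canonicalTable name "Accoustic Grand Piano"

-- ===== PRECONDITION & SPEC =====
def Spec_return_correct_name (name : String) (out : String) : Prop := out = return_correct_name_alt name
instance (name : String) (out : String) : Decidable (Spec_return_correct_name name out) := by unfold Spec_return_correct_name; infer_instance

-- ===== CLAIM =====
def Claim_equal_return_correct_name : Prop := ∀ (name : String), Dom_return_correct_name name → Spec_return_correct_name name (return_correct_name name)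

-- ===== LEMMAS AND PROOFS =====

-- every name occurring anywhere in either nested table, in order
def pvAllNames : List String :=
  (allInstruments.items).flatMap Prod.snd ++ (allInstrumentsPerso.items).flatMap Prod.snd

-- the flat table's keys are exactly pvAllNames, in the same order
set_option maxRecDepth 40000 in
theorem keys_canonicalTable : canonicalTable.keys = pvAllNames := by decide

-- a scan whose condition never fires leaves the accumulator alone
theorem foldl_if_skip (name : String) (f : String × List String → String)
    (entries : List (String × List String)) (init : String)
    (h : ∀ kv ∈ entries, name ∉ kv.2) :
    entries.foldl (fun acc kv => if name ∈ kv.2 then f kv else acc) init = init := by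
  induction entries generalizing init with
  | nil => rfl
  | cons kv tl ih =>
    have hkv := h kv (List.mem_cons_self ..)
    simp only [List.foldl_cons, if_neg hkv]
    exact ih init (fun x hx => h x (List.mem_cons_of_mem _ hx))

-- the two ports agree on every name in the tables (finite check)
set_option maxRecDepth 100000 in
theorem agree_on_pvAllNames :
    pvAllNames.all (fun n => return_correct_name n == return_correct_name_alt n) = true := by decide

-- ===== VERDICT =====
theorem return_correct_name_spec : Claim_equal_return_correct_name := by
  intro name _
  show return_correct_name name = return_correct_name_alt name
  by_cases hmem : name ∈ pvAllNames
  · exact eq_of_beq (List.all_eq_true.mp agree_on_pvAllNames name hmem)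
  · have hA : return_correct_name name = "Accoustic Grand Piano" := by
      unfold return_correct_name
      rw [foldl_if_skip, foldl_if_skip] <;>
        · intro kv hkv hin
          exact hmem (by
            unfold pvAllNames
            simp only [List.mem_append, List.mem_flatMap]
            first
              | exact Or.inl ⟨kv, hkv, hin⟩
              | exact Or.inr ⟨kv, hkv, hin⟩)
    have hB : return_correct_name_alt name = "Accoustic Grand Piano" := by
      unfold return_correct_name_alt
      apply PySem.Dict.getD_of_not_contains
      rw [PySem.Dict.contains_eq_decide_mem_keys, keys_canonicalTable]
      simp [hmem]
    rw [hA, hB]
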